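-- pv_equiv track=rewrite | github.com/rohan589/10701-project | booleanFeatures.py | calculate_OR
-- ===== SOURCE A (Python) =====
-- def calculate_OR(search_query, search_in_string):
-- 	current_max = 0
-- 	search_in_string = [x.lower() for x in search_in_string]
-- 	search_query = [x.lower() for x in search_query]
-- 	#print search_query
-- 	for word in search_query:
-- 		word_count = search_in_string.count(word)
-- 		if word_count >  current_max:
-- 			current_max = word_count
-- 	#print current_max
-- 	return current_max
-- ===== SOURCE B (Python) =====
-- def calculate_OR(search_query, search_in_string):
-- 	qs = {w.lower() for w in search_query}
-- 	tally = {}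
-- 	best = 0
-- 	for w in search_in_string:
-- 		w = w.lower()
-- 		if w in qs:
-- 			c = tally.get(w, 0) + 1
-- 			tally[w] = c
-- 			if c > best:
-- 				best = c
-- 	return best
-- ===== Notes on version B (the rewrite author's own statement) =====
-- stated objective: faster
-- what changed: Instead of scanning the whole document once per query word (list.count inside the query loop), B builds a set of lowered query words and makes a single pass over the document, tallying only words in that set and tracking the running maximum.
import Mathlib
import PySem

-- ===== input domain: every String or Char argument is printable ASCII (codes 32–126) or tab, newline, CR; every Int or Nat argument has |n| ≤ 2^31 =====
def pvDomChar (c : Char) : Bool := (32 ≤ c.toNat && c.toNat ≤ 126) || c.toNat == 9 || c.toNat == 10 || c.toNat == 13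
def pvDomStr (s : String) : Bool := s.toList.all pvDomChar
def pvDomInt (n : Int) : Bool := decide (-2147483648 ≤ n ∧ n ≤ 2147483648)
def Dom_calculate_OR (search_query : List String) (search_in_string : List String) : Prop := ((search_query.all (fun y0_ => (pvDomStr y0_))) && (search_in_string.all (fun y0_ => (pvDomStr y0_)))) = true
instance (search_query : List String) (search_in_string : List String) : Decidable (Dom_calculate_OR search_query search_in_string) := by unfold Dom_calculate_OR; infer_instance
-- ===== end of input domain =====

-- B replaces A's per-query-word document scans by one set-filtered tallying pass over the document (objective: faster, asymptotic).

-- ===== PORT A =====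
-- Literal port of A: lower both lists, then for each query word scan the document with count, keeping the running max.
def calculate_OR (search_query : List String) (search_in_string : List String) : Int :=
  let current_max : Int := 0
  let search_in_string' := search_in_string.map PySem.Str.lower
  let search_query' := search_query.map PySem.Str.lower
  search_query'.foldl
    (fun current_max word =>
      let word_count : Int := (PySem.List.count search_in_string' word : Int)
      if word_count > current_max then word_count else current_max)
    current_max

-- ===== PORT B =====
-- Literal port of B (Source B): qs = set of lowered query words; one pass over the document,
-- tallying words that are in qs and tracking the running maximum tally.
def calculate_OR_alt (search_query : List String) (search_in_string : List String) : Int :=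
  let qs : PySem.Set String := PySem.Set.ofList (search_query.map PySem.Str.lower)
  let st := search_in_string.foldl
    (fun (st : PySem.Dict String Int × Int) w0 =>
      let w := PySem.Str.lower w0
      if qs.contains w then
        let c := st.1.getD w 0 + 1
        let tally := st.1.insert w c
        (tally, if c > st.2 then c else st.2)
      else st)
    (PySem.Dict.empty, 0)
  st.2

-- ===== PRECONDITION & SPEC =====
def Spec_calculate_OR (search_query : List String) (search_in_string : List String) (out : Int) : Prop := out = calculate_OR_alt search_query search_in_string
instance (search_query : List String) (search_in_string : List String) (out : Int) : Decidable (Spec_calculate_OR search_query search_in_string out) := by unfold Spec_calculate_OR; infer_instance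

-- ===== CLAIM (what is proved, stated in full; the proofs are below) =====
def Claim_equal_calculate_OR : Prop := ∀ (search_query : List String) (search_in_string : List String), Dom_calculate_OR search_query search_in_string → Spec_calculate_OR search_query search_in_string (calculate_OR search_query search_in_string)

-- ===== LEMMAS AND PROOFS =====

-- the max-fold both sides are reduced to
def mfold (f : String → Int) (l : List String) (a : Int) : Int :=
  l.foldl (fun m w => max m (f w)) a

theorem mfold_cons (f : String → Int) (x : String) (l : List String) (a : Int) :
    mfold f (x :: l) a = mfold f l (max a (f x)) := rfl

-- A's "if c > m then c else m" step IS a max-fold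
theorem foldl_if_max (f : String → Int) (l : List String) (a : Int) :
    l.foldl (fun m w => if f w > m then f w else m) a = mfold f l a := by
  induction l generalizing a with
  | nil => rfl
  | cons x l ih =>
      simp only [List.foldl, mfold_cons]
      rw [show (if f x > a then f x else a) = max a (f x) from by omega, ih]

-- pulling a max out of the seed
theorem mfold_max_seed (f : String → Int) (l : List String) (a b : Int) :
    mfold f l (max a b) = max (mfold f l a) b := by
  induction l generalizing a with
  | nil => rfl
  | cons x l ih =>
      rw [mfold_cons, mfold_cons,
        show max (max a b) (f x) = max (max a (f x)) b from by omega, ih]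

theorem mfold_congr (f g : String → Int) (l : List String) (a : Int)
    (h : ∀ u ∈ l, g u = f u) : mfold g l a = mfold f l a := by
  unfold mfold
  exact PySem.List.foldl_congr_mem l _ _ a (fun acc x hx => by rw [h x hx])

theorem mfold_zero (f : String → Int) (l : List String)
    (h : ∀ u ∈ l, f u = 0) : mfold f l 0 = 0 := by
  induction l with
  | nil => rfl
  | cons x l ih =>
      rw [mfold_cons, h x (by simp), max_self]
      exact ih (fun u hu => h u (by simp [hu]))

-- incrementing f at one member w of l shifts the max-fold to max with the new value
theorem mfold_update (f g : String → Int) (l : List String) (w : String) (c : Int)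
    (hmem : w ∈ l) (hgw : g w = c) (hfw : f w ≤ c) (hne : ∀ u, u ≠ w → g u = f u) :
    ∀ a, mfold g l a = max (mfold f l a) c := by
  induction l with
  | nil => simp at hmem
  | cons x l ih =>
      intro a
      rw [mfold_cons, mfold_cons]
      by_cases hx : x = w
      · subst hx
        rw [hgw]
        by_cases hwl : x ∈ l
        · rw [ih hwl (max a c), mfold_max_seed, mfold_max_seed]
          omega
        · have hcg : mfold g l (max a c) = mfold f l (max a c) := by
            refine mfold_congr f g l _ (fun u hu => hne u ?_)
            intro h; exact hwl (h ▸ hu)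
          rw [hcg, mfold_max_seed, mfold_max_seed]
          omega
      · rw [hne x hx]
        have hwl : w ∈ l := by cases hmem with
          | head => exact absurd rfl hx
          | tail _ h => exact h
        exact ih hwl (max a (f x))

-- List.count after appending one element
theorem count_append_one (p : List String) (w u : String) :
    (PySem.List.count (p ++ [w]) u : Int) =
      (PySem.List.count p u : Int) + (if u = w then 1 else 0) := by
  by_cases h : u = w
  · subst h; simp [PySem.List.count_eq, List.count_append]
  · have hwu : (w == u) = false := beq_eq_false_iff_ne.mpr (fun e => h e.symm)
    simp [PySem.List.count_eq, List.count_append, List.count_cons, h, hwu]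

-- B's loop body, on an already-lowered word
def bstep (qs : PySem.Set String) (st : PySem.Dict String Int × Int) (w : String) :
    PySem.Dict String Int × Int :=
  if qs.contains w then
    (st.1.insert w (st.1.getD w 0 + 1),
      if st.1.getD w 0 + 1 > st.2 then st.1.getD w 0 + 1 else st.2)
  else st

theorem contains_ofList_iff (l : List String) (w : String) :
    PySem.Set.contains (PySem.Set.ofList l) w = true ↔ w ∈ l := by
  have h : PySem.Set.contains (PySem.Set.ofList l) w = List.contains (PySem.Set.ofList l) w := rfl
  rw [h, List.contains_iff_mem, PySem.Set.mem_ofList]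

-- loop invariant: the tally holds each query word's count in the processed prefix p,
-- and b is the running maximum of those counts
theorem loop_inv (q' : List String) (rest : List String) :
    ∀ (p : List String) (t : PySem.Dict String Int) (b : Int),
    (∀ u ∈ q', t.getD u 0 = (PySem.List.count p u : Int)) →
    b = mfold (fun w => (PySem.List.count p w : Int)) q' 0 →
    (rest.foldl (bstep (PySem.Set.ofList q')) (t, b)).2
      = mfold (fun w => (PySem.List.count (p ++ rest) w : Int)) q' 0 := by
  induction rest with
  | nil =>
      intro p t b _ hb
      simpa using hb
  | cons w rest ih =>
      intro p t b ht hb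
      rw [List.foldl_cons]
      by_cases hc : PySem.Set.contains (PySem.Set.ofList q') w = true
      · have hwq : w ∈ q' := (contains_ofList_iff q' w).mp hc
        have hstep : bstep (PySem.Set.ofList q') (t, b) w =
            (t.insert w (t.getD w 0 + 1),
              if t.getD w 0 + 1 > b then t.getD w 0 + 1 else b) := by
          unfold bstep; rw [hc]; simp
        rw [hstep]
        have hpw : p ++ w :: rest = (p ++ [w]) ++ rest := by simp
        rw [hpw]
        apply ih
        · intro u hu
          rw [PySem.Dict.getD_insert, count_append_one]
          by_cases huw : u = w
          · simp [huw, ht w hwq]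
          · simp [huw, ht u hu]
        · have hup := mfold_update (fun u => (PySem.List.count p u : Int))
            (fun u => (PySem.List.count (p ++ [w]) u : Int)) q' w
            ((PySem.List.count p w : Int) + 1) hwq
            (by show (PySem.List.count (p ++ [w]) w : Int) = _
                rw [count_append_one]; simp)
            (by show (PySem.List.count p w : Int) ≤ _; omega)
            (fun u hu => by
              show (PySem.List.count (p ++ [w]) u : Int) = (PySem.List.count p u : Int)
              rw [count_append_one]; simp [hu]) 0
          rw [hup, ← hb, ht w hwq]
          omega
      · have hwq : w ∉ q' := fun h => hc ((contains_ofList_iff q' w).mpr h)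
        have hcf : PySem.Set.contains (PySem.Set.ofList q') w = false := by
          revert hc; cases PySem.Set.contains (PySem.Set.ofList q') w <;> simp
        have hstep : bstep (PySem.Set.ofList q') (t, b) w = (t, b) := by
          unfold bstep; rw [hcf]; simp
        rw [hstep]
        have hpw : p ++ w :: rest = (p ++ [w]) ++ rest := by simp
        rw [hpw]
        apply ih
        · intro u hu
          rw [count_append_one]
          have : u ≠ w := fun e => hwq (e ▸ hu)
          simp [this, ht u hu]
        · rw [hb]
          exact (mfold_congr _ _ q' 0 (fun u hu => by
            have hne : u ≠ w := fun e => hwq (e ▸ hu)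
            show (PySem.List.count (p ++ [w]) u : Int) = (PySem.List.count p u : Int)
            rw [count_append_one]; simp [hne])).symm

-- ===== VERDICT (by name: the statement is the Claim_ definition above) =====
theorem calculate_OR_spec : Claim_equal_calculate_OR := by
  intro q d _
  unfold Spec_calculate_OR
  have hA : calculate_OR q d =
      mfold (fun w => (PySem.List.count (d.map PySem.Str.lower) w : Int))
        (q.map PySem.Str.lower) 0 :=
    foldl_if_max _ _ 0
  have hB : calculate_OR_alt q d =
      ((d.map PySem.Str.lower).foldl
        (bstep (PySem.Set.ofList (q.map PySem.Str.lower))) (PySem.Dict.empty, 0)).2 :=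
    congrArg Prod.snd
      (List.foldl_map (f := PySem.Str.lower)
        (g := bstep (PySem.Set.ofList (q.map PySem.Str.lower)))
        (l := d) (init := (PySem.Dict.empty, 0))).symm
  rw [hA, hB, loop_inv (q.map PySem.Str.lower) (d.map PySem.Str.lower) []
    PySem.Dict.empty 0
    (fun u _ => by simp [PySem.Dict.getD_empty, PySem.List.count_eq])
    ((mfold_zero _ _ (fun u _ => by simp [PySem.List.count_eq])).symm)]
  simp
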